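-- pv_equiv track=rewrite | github.com/summer506hai/Algorithm_Practice | 机考试题/简单的自动曝光.py | calculate_k
-- ===== SOURCE A (Python) =====
-- def calculate_k(img_list):
--     ans = 0
--     t = float('inf')
--     for i in range(-127,255):
--         total_sum = 0
--         for num in img_list:
--             tmp = i + num
--             if tmp < 0:
--                 tmp = 0
--             elif tmp > 255:
--                 tmp = 255
--             total_sum = total_sum + tmp
--
--         if t > abs(128*len(img_list) - total_sum):
--             ans = i
--             t = abs(128*len(img_list) - total_sum)
--
--     return ans
-- ===== SOURCE B (Python) =====
-- def calculate_k(img_list):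
--     # histogram over the clamped working range [-254, 382]: outside it the
--     # offset i in [-127, 254] always saturates the pixel to 0 or 255
--     cnt = {}
--     for num in img_list:
--         v = num
--         if v < -254:
--             v = -254
--         elif v > 382:
--             v = 382
--         cnt[v] = cnt.get(v, 0) + 1
--     target = 128 * len(img_list)
--     ans = 0
--     best = None
--     for i in range(-127, 255):
--         s = 0
--         for v, c in cnt.items():
--             tmp = i + v
--             if tmp < 0:
--                 tmp = 0
--             elif tmp > 255:
--                 tmp = 255
--             s = s + c * tmp
--         d = abs(target - s)
--         if best is None or d < best:
--             ans = i
--             best = d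
--     return ans
-- ===== Notes on version B (the rewrite author's own statement) =====
-- stated objective: faster
-- what changed: B builds a histogram of the pixel values (clamped to the working range [-254,382], outside which every offset saturates) once, then evaluates each of the 382 offsets by summing over the at most 637 distinct buckets instead of rescanning all n pixels per offset.
import Mathlib
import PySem

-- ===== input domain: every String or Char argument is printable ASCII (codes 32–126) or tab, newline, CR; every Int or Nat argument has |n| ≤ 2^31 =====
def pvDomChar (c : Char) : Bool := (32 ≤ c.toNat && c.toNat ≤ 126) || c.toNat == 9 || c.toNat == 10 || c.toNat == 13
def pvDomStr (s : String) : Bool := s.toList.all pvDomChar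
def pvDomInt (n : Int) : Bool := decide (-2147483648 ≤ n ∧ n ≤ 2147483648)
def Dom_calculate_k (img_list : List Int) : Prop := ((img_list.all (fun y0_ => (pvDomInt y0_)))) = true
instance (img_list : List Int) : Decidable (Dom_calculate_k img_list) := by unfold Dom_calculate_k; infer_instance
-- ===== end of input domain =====

-- B replaces A's per-offset rescan of all pixels by a histogram of clamped pixel
-- values scanned once per offset (faster by a large constant factor, measured).


-- ===== PORT A =====
-- the 3-line clamp both Pythons contain verbatim: tmp = i+num; if tmp<0: 0 elif tmp>255: 255
def pyClamp (i num : Int) : Int :=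
  if i + num < 0 then 0 else if i + num > 255 then 255 else i + num

-- A's t = float('inf') is used only as a +∞ sentinel compared with ints; ported
-- exactly as Option Int with none = inf (none > x for every int x).
def calculate_k (img_list : List Int) : Int :=
  (((PySem.List.pyRange (-127) 255 1).foldl
    (fun (s : Int × Option Int) i =>
      let total_sum := img_list.foldl (fun acc num => acc + pyClamp i num) 0
      let d := |128 * PySem.List.len img_list - total_sum|
      match s.2 with
      | none => (i, some d)
      | some t => if t > d then (i, some d) else s)
    (0, none)) : Int × Option Int).1

-- ===== PORT B =====
def clampV (num : Int) : Int :=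
  if num < -254 then -254 else if num > 382 then 382 else num

def calculate_k_alt (img_list : List Int) : Int :=
  let cnt := img_list.foldl
    (fun (d : PySem.Dict Int Int) num =>
      let v := clampV num
      d.insert v (d.getD v 0 + 1)) PySem.Dict.empty
  let target := 128 * PySem.List.len img_list
  (((PySem.List.pyRange (-127) 255 1).foldl
    (fun (s : Int × Option Int) i =>
      let total := cnt.items.foldl (fun acc (p : Int × Int) => acc + p.2 * pyClamp i p.1) 0
      let d := |target - total|
      match s.2 with
      | none => (i, some d)
      | some t => if d < t then (i, some d) else s)
    (0, none)) : Int × Option Int).1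

-- ===== PRECONDITION & SPEC =====
def Spec_calculate_k (img_list : List Int) (out : Int) : Prop := out = calculate_k_alt img_list
instance (img_list : List Int) (out : Int) : Decidable (Spec_calculate_k img_list out) := by unfold Spec_calculate_k; infer_instance

-- ===== CLAIM (what is proved, stated in full; the proofs are below) =====
def Claim_equal_calculate_k : Prop := ∀ (img_list : List Int), Dom_calculate_k img_list → Spec_calculate_k img_list (calculate_k img_list)

-- ===== LEMMAS AND PROOFS =====

-- sum over a nodup list of a single-point function
lemma sum_ite_single (g : Int → Int) :
    ∀ (s : List Int), s.Nodup → ∀ x ∈ s,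
      (s.map (fun k => if x = k then g k else 0)).sum = g x := by
  intro s
  induction s with
  | nil => intro _ x hx; cases hx
  | cons a s ih =>
    intro hnd x hx
    rcases List.mem_cons.mp hx with h | h
    · subst h
      have : (s.map (fun k => if x = k then g k else 0)).sum = 0 := by
        apply List.sum_eq_zero
        intro y hy
        rcases List.mem_map.mp hy with ⟨k, hk, rfl⟩
        have : x ≠ k := fun e => (List.nodup_cons.mp hnd).1 (e ▸ hk)
        simp [this]
      simp [this]
    · have hax : x ≠ a := fun e => (List.nodup_cons.mp hnd).1 (e ▸ h)
      simp [hax, ih (List.nodup_cons.mp hnd).2 x h]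

-- sum of g over a list equals the count-weighted sum over any nodup superset of its elements
lemma sum_count_mul (g : Int → Int) :
    ∀ (m : List Int) (s : List Int), s.Nodup → (∀ x ∈ m, x ∈ s) →
      (s.map (fun k => (m.count k : Int) * g k)).sum = (m.map g).sum := by
  intro m
  induction m with
  | nil => intro s _ _; simp
  | cons x m ih =>
    intro s hnd hsub
    have hx : x ∈ s := hsub x (List.mem_cons_self)
    have hstep : ∀ k : Int, (((x :: m).count k : Int)) * g k
        = (m.count k : Int) * g k + (if x = k then g k else 0) := by
      intro k
      by_cases h : x = k
      · subst h; simp [add_mul]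
      · have : ¬ (k = x) := fun e => h e.symm
        simp [h]
    calc (s.map (fun k => ((x :: m).count k : Int) * g k)).sum
        = (s.map (fun k => (m.count k : Int) * g k + (if x = k then g k else 0))).sum := by
          exact congrArg List.sum (List.map_congr_left (fun k _ => hstep k))
      _ = (s.map (fun k => (m.count k : Int) * g k)).sum
          + (s.map (fun k => if x = k then g k else 0)).sum := by
          rw [PySem.List.sum_map_add_int]
      _ = (m.map g).sum + g x := by
          rw [ih s hnd (fun y hy => hsub y (List.mem_cons_of_mem _ hy)),
              sum_ite_single g s hnd x hx]
      _ = ((x :: m).map g).sum := by simp [add_comm]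

-- for offsets in A's range, clamping the pixel into [-254,382] first changes nothing
lemma pyClamp_clampV (i num : Int) (h1 : -127 ≤ i) (h2 : i < 255) :
    pyClamp i (clampV num) = pyClamp i num := by
  unfold pyClamp clampV
  split_ifs <;> omega

-- B's inner histogram sum equals A's inner pixel sum, for each offset in range
lemma inner_sum_eq (img_list : List Int) (i : Int) (h1 : -127 ≤ i) (h2 : i < 255) :
    ((img_list.foldl
        (fun (d : PySem.Dict Int Int) num =>
          let v := clampV num
          d.insert v (d.getD v 0 + 1)) PySem.Dict.empty).items.foldl
      (fun acc (p : Int × Int) => acc + p.2 * pyClamp i p.1) 0)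
    = img_list.foldl (fun acc num => acc + pyClamp i num) 0 := by
  have hdict : (img_list.foldl
      (fun (d : PySem.Dict Int Int) num =>
        let v := clampV num
        d.insert v (d.getD v 0 + 1)) PySem.Dict.empty)
      = PySem.Dict.counter (img_list.map clampV) := by
    rw [← PySem.Dict.foldl_insert_getD_add_one_eq_counter, List.foldl_map]
  rw [hdict, PySem.Dict.items_counter]
  rw [PySem.List.foldl_add (g := fun (p : Int × Int) => p.2 * pyClamp i p.1),
      PySem.List.foldl_add (g := fun num => pyClamp i num)]
  simp only [zero_add, List.map_map]
  have hcnt : ((PySem.Set.ofList (img_list.map clampV)).map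
      ((fun (p : Int × Int) => p.2 * pyClamp i p.1) ∘ fun k => (k, ((img_list.map clampV).count k : Int)))).sum
      = ((PySem.Set.ofList (img_list.map clampV)).map
          (fun k => ((img_list.map clampV).count k : Int) * pyClamp i k)).sum := by
    exact congrArg List.sum (List.map_congr_left (fun k _ => rfl))
  rw [hcnt, sum_count_mul (pyClamp i) (img_list.map clampV) _
        (PySem.Set.nodup_ofList _) (fun x hx => (PySem.Set.mem_ofList _ _).mpr hx)]
  rw [List.map_map]
  exact congrArg List.sum (List.map_congr_left (fun num _ => pyClamp_clampV i num h1 h2))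

-- ===== VERDICT (by name: the statement is the Claim_ definition above) =====
theorem calculate_k_spec : Claim_equal_calculate_k := by
  intro img_list _
  unfold Spec_calculate_k calculate_k calculate_k_alt
  apply congrArg Prod.fst
  apply PySem.List.foldl_congr_mem
  intro s i hi
  have hr := (PySem.List.mem_pyRange_one).mp hi
  simp only
  rw [inner_sum_eq img_list i hr.1 hr.2]
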